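-- pv_equiv track=rewrite | github.com/terrordrummer/robyx-ai | bot/scheduled_delivery.py | _error_excerpt
-- ===== SOURCE A (Python) =====
-- def _error_excerpt(raw_output: str, max_chars: int = 800) -> str:
--     lines = [line.strip() for line in (raw_output or "").splitlines() if line.strip()]
--     if not lines:
--         return ""
--     excerpt = "\n".join(lines[-8:])
--     if len(excerpt) > max_chars:
--         excerpt = excerpt[-max_chars:]
--     return excerpt
-- ===== SOURCE B (Python) =====
-- def _error_excerpt(raw_output: str, max_chars: int = 800) -> str:
--     buf = []
--     for line in reversed((raw_output or "").splitlines()):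
--         s = line.strip()
--         if s:
--             buf.append(s)
--             if len(buf) == 8:
--                 break
--     if not buf:
--         return ""
--     excerpt = "\n".join(reversed(buf))
--     if len(excerpt) > max_chars:
--         excerpt = excerpt[-max_chars:]
--     return excerpt
-- ===== Notes on version B (the rewrite author's own statement) =====
-- stated objective: alternative
-- what changed: Replaced the full-pass strip-and-filter comprehension over all lines with a single reverse scan that strips lines on the fly and stops as soon as 8 non-empty lines are collected, then reverses the buffer before joining and truncating.
import Mathlib
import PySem

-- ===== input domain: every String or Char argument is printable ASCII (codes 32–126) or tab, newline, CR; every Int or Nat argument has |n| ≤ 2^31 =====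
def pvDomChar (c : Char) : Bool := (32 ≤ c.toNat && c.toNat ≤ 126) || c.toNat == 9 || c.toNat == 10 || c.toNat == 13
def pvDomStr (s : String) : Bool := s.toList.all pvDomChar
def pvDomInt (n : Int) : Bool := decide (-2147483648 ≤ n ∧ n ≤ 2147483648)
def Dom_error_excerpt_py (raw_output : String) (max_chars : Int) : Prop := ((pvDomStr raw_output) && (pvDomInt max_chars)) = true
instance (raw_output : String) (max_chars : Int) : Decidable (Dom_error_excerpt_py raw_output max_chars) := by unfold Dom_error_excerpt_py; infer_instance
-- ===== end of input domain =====

-- B replaces the full map/filter pass with a single reverse scan that stops after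
-- collecting 8 non-empty stripped lines (objective: alternative decomposition / early exit).

-- ===== PORT A =====
def error_excerpt_py (raw_output : String) (max_chars : Int) : String :=
  -- lines = [line.strip() for line in (raw_output or "").splitlines() if line.strip()]
  let lines := ((PySem.Chars.splitlines raw_output.toList).map PySem.Chars.strip).filter
      (fun l => !l.isEmpty)
  if lines = [] then ""
  else
    -- excerpt = "\n".join(lines[-8:])
    let excerpt := PySem.Chars.join ['\n'] (PySem.List.slice lines (some (-8)) none)
    let excerpt := if (excerpt.length : Int) > max_chars then
        PySem.List.slice excerpt (some (-max_chars)) none else excerpt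
    String.ofList excerpt

-- ===== PORT B =====
-- the reverse loop of Source B: append stripped non-empty lines, break at 8
def pvGo (xs : List (List Char)) (buf : List (List Char)) : List (List Char) :=
  match xs with
  | [] => buf
  | l :: rest =>
    let s := PySem.Chars.strip l
    if s.isEmpty then pvGo rest buf
    else
      let buf' := buf ++ [s]
      if buf'.length == 8 then buf' else pvGo rest buf'

def error_excerpt_py_alt (raw_output : String) (max_chars : Int) : String :=
  let buf := pvGo (PySem.Chars.splitlines raw_output.toList).reverse []
  if buf = [] then ""
  else
    let excerpt := PySem.Chars.join ['\n'] buf.reverse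
    let excerpt := if (excerpt.length : Int) > max_chars then
        PySem.List.slice excerpt (some (-max_chars)) none else excerpt
    String.ofList excerpt

-- ===== PRECONDITION & SPEC =====
def Spec_error_excerpt_py (raw_output : String) (max_chars : Int) (out : String) : Prop := out = error_excerpt_py_alt raw_output max_chars
instance (raw_output : String) (max_chars : Int) (out : String) : Decidable (Spec_error_excerpt_py raw_output max_chars out) := by unfold Spec_error_excerpt_py; infer_instance

-- ===== CLAIM (what is proved, stated in full; the proofs are below) =====
def Claim_equal_error_excerpt_py : Prop := ∀ (raw_output : String) (max_chars : Int), Dom_error_excerpt_py raw_output max_chars → Spec_error_excerpt_py raw_output max_chars (error_excerpt_py raw_output max_chars)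

-- ===== LEMMAS AND PROOFS =====

-- the loop collects the first (8 - |buf|) non-empty stripped lines after buf
theorem pvGo_spec (xs : List (List Char)) (buf : List (List Char)) (h : buf.length < 8) :
    pvGo xs buf = buf ++ (((xs.map PySem.Chars.strip).filter (fun l => !l.isEmpty)).take (8 - buf.length)) := by
  induction xs generalizing buf with
  | nil => simp [pvGo]
  | cons l rest ih =>
    simp only [pvGo, List.map_cons, List.filter_cons]
    by_cases hs : (PySem.Chars.strip l).isEmpty
    · simp [hs, ih buf h]
    · rw [if_neg hs]
      simp only [hs, Bool.not_false, if_true]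
      by_cases h8 : buf.length + 1 = 8
      · rw [if_pos (by simp [List.length_append]; omega)]
        have h1 : 8 - buf.length = 1 := by omega
        rw [h1]
        simp
      · rw [if_neg (by simp [List.length_append]; omega),
            ih _ (by simp only [List.length_append, List.length_cons, List.length_nil]; omega)]
        have h1 : 8 - buf.length = (8 - (buf.length + 1)) + 1 := by omega
        rw [h1, List.take_succ_cons]
        simp

theorem error_excerpt_py_spec : Claim_equal_error_excerpt_py := by
  unfold Claim_equal_error_excerpt_py Spec_error_excerpt_py
  intro raw_output max_chars _
  unfold error_excerpt_py error_excerpt_py_alt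
  set L := ((PySem.Chars.splitlines raw_output.toList).map PySem.Chars.strip).filter
      (fun l => !l.isEmpty) with hL
  have hbuf : pvGo (PySem.Chars.splitlines raw_output.toList).reverse [] = (L.reverse).take 8 := by
    rw [pvGo_spec _ [] (by simp)]
    simp [hL, List.filter_reverse]
  rw [hbuf]
  have hrev : ((L.reverse).take 8).reverse = PySem.List.slice L (some (-8)) none := by
    rw [PySem.List.slice_from_neg_ofNat L 8 (by omega)]
    rw [List.take_reverse, List.reverse_reverse]
  by_cases hnil : L = []
  · simp [hnil]
  · rw [if_neg hnil, if_neg (by simp [hnil]), hrev]
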